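-- pv_equiv track=rewrite | github.com/lisanhuarchive/udel-2016Fall-882 | proj2/letter_predict.py | training
-- ===== SOURCE A (Python) =====
-- ngram = 5
--
-- def get_char(text: str, index: int):
--     if index in range(len(text)):
--         return text[index].lower()
--     return ''
--
-- def add_one_occ(d: dict, ch, key):
--     ref = key + ch
--     if key in d:
--         d[key] += 1
--     else:
--         d[key] = 1
--     if ref in d:
--         d[ref] += 1
--     else:
--         d[ref] = 1
--
-- def training(text: str, statistics: dict):
--     for i in range(len(text)):
--         key = [get_char(text, i - j - 1) for j in range(ngram)]
--         key.reverse()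
--         key = ''.join(key)
--         ch = text[i]
--         add_one_occ(statistics, ch, key)
--     return statistics
-- ===== SOURCE B (Python) =====
-- def training(text: str, statistics: dict):
--     window = ''
--     for ch in text:
--         statistics[window] = statistics.get(window, 0) + 1
--         ref = window + ch
--         statistics[ref] = statistics.get(ref, 0) + 1
--         window = (window + ch.lower())[-5:]
--     return statistics
-- ===== Notes on version B (the rewrite author's own statement) =====
-- stated objective: faster
-- what changed: B carries one sliding window of the last up-to-5 lowercased characters across the loop instead of rebuilding the key at every position from 5 indexed get_char lookups plus list-build, reverse and join.
import Mathlib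
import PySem

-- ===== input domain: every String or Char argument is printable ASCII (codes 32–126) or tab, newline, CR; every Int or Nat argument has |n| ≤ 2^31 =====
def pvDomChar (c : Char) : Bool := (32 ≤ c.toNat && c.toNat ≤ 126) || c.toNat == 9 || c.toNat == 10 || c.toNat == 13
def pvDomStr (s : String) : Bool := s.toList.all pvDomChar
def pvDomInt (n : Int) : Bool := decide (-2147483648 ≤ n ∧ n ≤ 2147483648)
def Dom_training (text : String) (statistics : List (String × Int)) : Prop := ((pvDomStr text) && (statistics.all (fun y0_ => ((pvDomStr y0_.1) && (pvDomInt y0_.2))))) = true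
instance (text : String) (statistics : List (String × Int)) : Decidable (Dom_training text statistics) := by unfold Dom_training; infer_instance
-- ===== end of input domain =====

-- B replaces A's per-position key rebuild (5 indexed lookups, reverse, join) by a single
-- sliding window carried across the loop (objective: simpler/alternative decomposition).
-- Both Pythons mutate `statistics` in place identically; the equivalence proved here is
-- about the returned dictionary (which is that same object).

-- ===== PORT A =====
-- Python strs produced by get_char / key / ch are modelled as List Char; dict keys become
-- String via String.ofList exactly where Python uses them as dict keys.
def get_char (text : String) (index : Int) : List Char :=
  if 0 ≤ index ∧ index < (text.toList.length : Int) then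
    match PySem.Str.pyGet? text index with
    | some c => PySem.Chars.lower [c]
    | none => []
  else []

def add_one_occ (d : PySem.Dict String Int) (ch : List Char) (key : List Char) :
    PySem.Dict String Int :=
  let ref := key ++ ch
  let d1 := match d.get? (String.ofList key) with
    | some v => d.insert (String.ofList key) (v + 1)
    | none => d.insert (String.ofList key) 1
  match d1.get? (String.ofList ref) with
    | some v => d1.insert (String.ofList ref) (v + 1)
    | none => d1.insert (String.ofList ref) 1

def training (text : String) (statistics : List (String × Int)) : List (String × Int) :=
  ((PySem.List.pyRange 0 text.toList.length).foldl (fun d i =>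
    let key0 := (PySem.List.pyRange 0 5).map (fun j => get_char text (i - j - 1))
    let key := PySem.Chars.join [] key0.reverse
    let ch := (PySem.Str.pyGet? text i).elim [] (fun c => [c])
    add_one_occ d ch key) (PySem.Dict.mk statistics)).items

-- ===== PORT B =====
def training_alt (text : String) (statistics : List (String × Int)) : List (String × Int) :=
  (text.toList.foldl (fun (st : List Char × PySem.Dict String Int) c =>
    let w := st.1
    let d := st.2
    let d := d.insert (String.ofList w) (d.getD (String.ofList w) 0 + 1)
    let ref := w ++ [c]
    let d := d.insert (String.ofList ref) (d.getD (String.ofList ref) 0 + 1)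
    (PySem.Chars.slice (w ++ PySem.Chars.lower [c]) (some (-5)) none, d))
    ([], PySem.Dict.mk statistics)).2.items

-- ===== PRECONDITION & SPEC =====
def Spec_training (text : String) (statistics : List (String × Int)) (out : List (String × Int)) : Prop := out = training_alt text statistics
instance (text : String) (statistics : List (String × Int)) (out : List (String × Int)) : Decidable (Spec_training text statistics out) := by unfold Spec_training; infer_instance

-- ===== CLAIM (what is proved, stated in full; the proofs are below) =====
def Claim_equal_training : Prop := ∀ (text : String) (statistics : List (String × Int)), Dom_training text statistics → Spec_training text statistics (training text statistics)

-- ===== LEMMAS AND PROOFS =====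

def keyA (text : String) (k : Nat) : List Char :=
  PySem.Chars.join []
    ((PySem.List.pyRange 0 5).map (fun j => get_char text ((k : Int) - j - 1))).reverse
lemma slice_neg5 (l : List Char) :
    PySem.Chars.slice l (some (-5)) none = l.drop (l.length - 5) := by
  simp [PySem.Chars.slice_eq_listSlice, PySem.List.slice]

lemma get_char_nat (text : String) (k : Nat) (h : k < text.toList.length) :
    get_char text (k : Int) = [PySem.Chars.lowerChar text.toList[k]] := by
  have h' : k < text.length := by simpa using h
  simp [get_char, PySem.Chars.lower, h']

lemma get_char_len (text : String) (i : Int) : (get_char text i).length ≤ 1 := by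
  unfold get_char
  split
  · cases h : PySem.Str.pyGet? text i <;> simp [PySem.Chars.lower]
  · simp

lemma get_char_len_one (text : String) (i : Int) (h0 : 0 ≤ i)
    (h1 : i < (text.toList.length : Int)) : (get_char text i).length = 1 := by
  lift i to Nat using h0 with n
  rw [get_char_nat text n (by exact_mod_cast h1)]
  simp

lemma get_char_ne_nil (text : String) (i : Int) (h : get_char text i ≠ []) :
    0 ≤ i ∧ i < (text.toList.length : Int) := by
  by_contra hc
  rw [not_and_or] at hc
  apply h
  unfold get_char
  rw [if_neg]
  tauto

lemma drop5 (g5 g4 g3 g2 g1 : List Char) (x : Char)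
    (h5 : g5.length ≤ 1) (h4 : g4.length ≤ 1) (h3 : g3.length ≤ 1)
    (h2 : g2.length ≤ 1) (h1 : g1.length ≤ 1)
    (mono : g5 ≠ [] → g4.length = 1 ∧ g3.length = 1 ∧ g2.length = 1 ∧ g1.length = 1) :
    (g5 ++ (g4 ++ (g3 ++ (g2 ++ (g1 ++ [x]))))).drop
      ((g5 ++ (g4 ++ (g3 ++ (g2 ++ (g1 ++ [x]))))).length - 5) =
      g4 ++ (g3 ++ (g2 ++ (g1 ++ [x]))) := by
  cases g5 with
  | nil =>
    simp only [List.nil_append]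
    have hz : (g4 ++ (g3 ++ (g2 ++ (g1 ++ [x])))).length - 5 = 0 := by
      simp [List.length_append]; omega
    rw [hz, List.drop_zero]
  | cons a t =>
    match t with
    | _ :: _ => simp at h5
    | [] =>
    obtain ⟨h4', h3', h2', h1'⟩ := mono (by simp)
    obtain ⟨a4, rfl⟩ := List.length_eq_one_iff.mp h4'
    obtain ⟨a3, rfl⟩ := List.length_eq_one_iff.mp h3'
    obtain ⟨a2, rfl⟩ := List.length_eq_one_iff.mp h2'
    obtain ⟨a1, rfl⟩ := List.length_eq_one_iff.mp h1'
    simp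

lemma range05 : PySem.List.pyRange 0 5 = [0,1,2,3,4] := by decide

lemma keyA_succ (text : String) (k : Nat) (hk : k < text.toList.length) :
    keyA text (k + 1) =
      PySem.Chars.slice (keyA text k ++ PySem.Chars.lower [text.toList[k]])
        (some (-5)) none := by
  rw [slice_neg5]
  unfold keyA
  rw [range05]
  simp only [List.map, List.reverse, List.reverseAux, PySem.Chars.join, List.intercalate,
    List.intersperse, List.flatten, PySem.Chars.lower, List.map, List.append_eq,
    List.nil_append, List.append_nil, List.append_assoc]
  have e0 : ((k+1:Nat):Int) - 0 - 1 = (k:Int) := by push_cast; ring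
  have e1 : ((k+1:Nat):Int) - 1 - 1 = (k:Int) - 1 := by push_cast; ring
  have e2 : ((k+1:Nat):Int) - 2 - 1 = (k:Int) - 2 := by push_cast; ring
  have e3 : ((k+1:Nat):Int) - 3 - 1 = (k:Int) - 3 := by push_cast; ring
  have e4 : ((k+1:Nat):Int) - 4 - 1 = (k:Int) - 4 := by push_cast; ring
  have f0 : (k:Int) - 0 - 1 = (k:Int) - 1 := by ring
  have f1 : (k:Int) - 1 - 1 = (k:Int) - 2 := by ring
  have f2 : (k:Int) - 2 - 1 = (k:Int) - 3 := by ring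
  have f3 : (k:Int) - 3 - 1 = (k:Int) - 4 := by ring
  have f4 : (k:Int) - 4 - 1 = (k:Int) - 5 := by ring
  rw [e0, e1, e2, e3, e4, f0, f1, f2, f3, f4, get_char_nat text k hk]
  exact (drop5 (get_char text ((k:Int) - 5)) (get_char text ((k:Int) - 4))
    (get_char text ((k:Int) - 3)) (get_char text ((k:Int) - 2)) (get_char text ((k:Int) - 1))
    (PySem.Chars.lowerChar text.toList[k])
    (get_char_len _ _) (get_char_len _ _) (get_char_len _ _) (get_char_len _ _) (get_char_len _ _)
    (fun hne => by
      obtain ⟨h0, _⟩ := get_char_ne_nil text _ hne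
      refine ⟨?_, ?_, ?_, ?_⟩ <;> exact get_char_len_one text _ (by omega) (by omega))).symm

lemma bump (d : PySem.Dict String Int) (s : String) :
    (match d.get? s with
      | some v => d.insert s (v + 1)
      | none => d.insert s 1) = d.insert s (d.getD s 0 + 1) := by
  cases h : d.get? s <;> simp [PySem.Dict.getD, h]

lemma add_one_occ_eq (d : PySem.Dict String Int) (ch key : List Char) :
    add_one_occ d ch key =
      (d.insert (String.ofList key) (d.getD (String.ofList key) 0 + 1)).insert
        (String.ofList (key ++ ch))
        ((d.insert (String.ofList key) (d.getD (String.ofList key) 0 + 1)).getD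
          (String.ofList (key ++ ch)) 0 + 1) := by
  unfold add_one_occ
  rw [bump, bump]

lemma keyA_zero (text : String) : keyA text 0 = [] := by
  rw [keyA, range05]
  norm_num [get_char, PySem.Chars.join, List.intercalate, List.intersperse]

lemma stepB_state (text : String) (k : Nat) (hk : k < text.toList.length)
    (d : PySem.Dict String Int) (c : Char) (hc : c = text.toList[k]) :
    (fun (st : List Char × PySem.Dict String Int) c =>
      let w := st.1
      let d := st.2
      let d := d.insert (String.ofList w) (d.getD (String.ofList w) 0 + 1)
      let ref := w ++ [c]
      let d := d.insert (String.ofList ref) (d.getD (String.ofList ref) 0 + 1)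
      (PySem.Chars.slice (w ++ PySem.Chars.lower [c]) (some (-5)) none, d))
      (keyA text k, d) c =
    (keyA text (k + 1),
      (fun d i =>
        let key0 := (PySem.List.pyRange 0 5).map (fun j => get_char text (i - j - 1))
        let key := PySem.Chars.join [] key0.reverse
        let ch := (PySem.Str.pyGet? text i).elim [] (fun c => [c])
        add_one_occ d ch key) d (k : Int)) := by
  simp only []
  refine Prod.ext ?_ ?_
  · rw [keyA_succ text k hk, hc]
  · show _ = add_one_occ d _ _
    rw [add_one_occ_eq]
    rw [show (PySem.Str.pyGet? text (k : Int)).elim [] (fun c => [c]) = [c] by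
      rw [PySem.Str.pyGet?_natCast, List.getElem?_eq_getElem hk, hc]; rfl]
    rfl

lemma loop_eq (text : String) (suf : List Char) (k : Nat)
    (d : PySem.Dict String Int)
    (hsuf : suf = text.toList.drop k) :
    (PySem.List.pyRange (k : Int) (text.toList.length : Int)).foldl
      (fun d i =>
        let key0 := (PySem.List.pyRange 0 5).map (fun j => get_char text (i - j - 1))
        let key := PySem.Chars.join [] key0.reverse
        let ch := (PySem.Str.pyGet? text i).elim [] (fun c => [c])
        add_one_occ d ch key) d =
    (suf.foldl (fun (st : List Char × PySem.Dict String Int) c =>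
      let w := st.1
      let d := st.2
      let d := d.insert (String.ofList w) (d.getD (String.ofList w) 0 + 1)
      let ref := w ++ [c]
      let d := d.insert (String.ofList ref) (d.getD (String.ofList ref) 0 + 1)
      (PySem.Chars.slice (w ++ PySem.Chars.lower [c]) (some (-5)) none, d))
      (keyA text k, d)).2 := by
  induction suf generalizing k d with
  | nil =>
    have hk : text.toList.length <= k := by
      have := hsuf.symm
      rw [List.drop_eq_nil_iff] at this
      omega
    have hk' : text.length ≤ k := by simpa using hk
    rw [show PySem.List.pyRange (k : Int) (text.toList.length : Int) = [] by
      simp [PySem.List.pyRange]; omega]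
    simp
  | cons c suf ih =>
    have hk : k < text.toList.length := by
      by_contra h
      rw [List.drop_eq_nil_of_le (by omega)] at hsuf
      exact List.cons_ne_nil _ _ hsuf
    rw [List.drop_eq_getElem_cons hk] at hsuf
    obtain ⟨hc, hs⟩ : c = text.toList[k] ∧ suf = text.toList.drop (k + 1) :=
      ⟨(List.cons.injEq _ _ _ _ ▸ hsuf).1, (List.cons.injEq _ _ _ _ ▸ hsuf).2⟩
    rw [PySem.List.pyRange_one_cons (a := (k : Int)) (b := (text.toList.length : Int))
      (by exact_mod_cast hk)]
    rw [List.foldl_cons, List.foldl_cons]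
    rw [show (k : Int) + 1 = ((k + 1 : Nat) : Int) by push_cast; ring]
    rw [ih (k + 1) _ hs]
    have h2 := stepB_state text k hk d c hc
    congr 1
    congr 1
    exact h2.symm

-- ===== VERDICT (by name: the statement is the Claim_ definition above) =====
theorem training_spec : Claim_equal_training := by
  intro text statistics _
  unfold Spec_training training training_alt
  have h := loop_eq text text.toList 0 (PySem.Dict.mk statistics) (by simp)
  rw [keyA_zero, Nat.cast_zero] at h
  rw [h]
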